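-- pv_equiv track=rewrite | github.com/eric-sclafani/gram2vec | gram2vec/preprocess.py | sort_data
-- ===== SOURCE A (Python) =====
-- def sort_data(id_pairs, text_pairs) -> dict:
--     """This function maps authors or discourses to their texts."""
--     data = {}
--     # the pair lists are one to one corresponding, so iterate over them at once
--     for ids, texts in zip(id_pairs, text_pairs):
--         for id, text in zip(ids, texts):
--             if id not in data:
--                 data[id] = []
--             if text not in data[id]: # avoid duplicates
--                 data[id].append(text)
--     return data
-- ===== SOURCE B (Python) =====
-- def sort_data(id_pairs, text_pairs) -> dict:
--     """This function maps authors or discourses to their texts."""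
--     # Pass 1: group every text under its id, keeping duplicates.
--     groups = {}
--     for ids, texts in zip(id_pairs, text_pairs):
--         for id, text in zip(ids, texts):
--             groups.setdefault(id, []).append(text)
--     # Pass 2: rebuild the dict, deduplicating each group in first-occurrence order.
--     result = {}
--     for id, texts in groups.items():
--         unique = []
--         for t in texts:
--             if t not in unique:
--                 unique.append(t)
--         result[id] = unique
--     return result
-- ===== Notes on version B (the rewrite author's own statement) =====
-- stated objective: alternative
-- what changed: Replaces A's single interleaved loop (membership-checked append into the result dict) by two distinct phases: first group all texts per id with setdefault/append keeping duplicates, then rebuild the dict deduplicating each group with a local seen-list.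
import Mathlib
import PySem

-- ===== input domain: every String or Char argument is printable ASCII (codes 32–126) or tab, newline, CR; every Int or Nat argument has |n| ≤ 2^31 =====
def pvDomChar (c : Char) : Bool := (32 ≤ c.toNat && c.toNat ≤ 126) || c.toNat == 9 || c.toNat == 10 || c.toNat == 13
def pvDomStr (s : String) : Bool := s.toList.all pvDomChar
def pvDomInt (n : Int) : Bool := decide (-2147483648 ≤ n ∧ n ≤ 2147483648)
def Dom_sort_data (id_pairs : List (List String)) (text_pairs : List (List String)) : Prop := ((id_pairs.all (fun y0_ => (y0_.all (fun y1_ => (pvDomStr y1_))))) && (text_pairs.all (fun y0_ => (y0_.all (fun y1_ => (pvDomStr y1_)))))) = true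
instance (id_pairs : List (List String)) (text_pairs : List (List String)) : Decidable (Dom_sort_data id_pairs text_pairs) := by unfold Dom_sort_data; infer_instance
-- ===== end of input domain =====

-- B replaces A's single interleaved loop (membership-checked append into the result dict) by two
-- distinct phases: group all texts per id keeping duplicates, then rebuild the dict deduplicating
-- each group with a local seen-list (alternative decomposition, same cost).

-- ===== PORT A =====
def sort_data (id_pairs : List (List String)) (text_pairs : List (List String)) : List (String × List String) :=
  ((id_pairs.zip text_pairs).foldl
    (fun data p =>
      (p.1.zip p.2).foldl
        (fun data q =>
          let data1 := if data.contains q.1 then data else data.insert q.1 ([] : List String)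
          if q.2 ∈ data1.getD q.1 [] then data1
          else data1.insert q.1 (data1.getD q.1 [] ++ [q.2]))
        data)
    (PySem.Dict.empty : PySem.Dict String (List String))).items

-- ===== PORT B =====
-- the inner 'unique' loop of Source B's second pass
def dedupSeen (ts : List String) : List String :=
  ts.foldl (fun unique t => if t ∈ unique then unique else unique ++ [t]) []

-- 'groups.setdefault(id, []).append(text)' is exactly Dict.modify id [] (· ++ [text])
def sort_data_alt (id_pairs : List (List String)) (text_pairs : List (List String)) : List (String × List String) :=
  (((id_pairs.zip text_pairs).foldl
      (fun g p => (p.1.zip p.2).foldl (fun g q => g.modify q.1 [] (· ++ [q.2])) g)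
      (PySem.Dict.empty : PySem.Dict String (List String))).items.foldl
    (fun result kv => result.insert kv.1 (dedupSeen kv.2))
    (PySem.Dict.empty : PySem.Dict String (List String))).items

-- ===== PRECONDITION & SPEC =====
def Spec_sort_data (id_pairs : List (List String)) (text_pairs : List (List String)) (out : List (String × List String)) : Prop := out = sort_data_alt id_pairs text_pairs
instance (id_pairs : List (List String)) (text_pairs : List (List String)) (out : List (String × List String)) : Decidable (Spec_sort_data id_pairs text_pairs out) := by unfold Spec_sort_data; infer_instance

-- ===== CLAIM (what is proved, stated in full; the proofs are below) =====
def Claim_equal_sort_data : Prop := ∀ (id_pairs : List (List String)) (text_pairs : List (List String)), Dom_sort_data id_pairs text_pairs → Spec_sort_data id_pairs text_pairs (sort_data id_pairs text_pairs)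

-- ===== LEMMAS AND PROOFS =====

-- A's loop body and B's grouping loop body, named for the proofs
def stepA (data : PySem.Dict String (List String)) (q : String × String) : PySem.Dict String (List String) :=
  let data1 := if data.contains q.1 then data else data.insert q.1 ([] : List String)
  if q.2 ∈ data1.getD q.1 [] then data1
  else data1.insert q.1 (data1.getD q.1 [] ++ [q.2])

def stepG (g : PySem.Dict String (List String)) (q : String × String) : PySem.Dict String (List String) :=
  g.modify q.1 [] (· ++ [q.2])

-- value map relating B's grouping dict to A's dict
def FmapD (kv : String × List String) : String × List String := (kv.1, dedupSeen kv.2)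

lemma dedupSeen_snoc (ts : List String) (t : String) :
    dedupSeen (ts ++ [t]) = if t ∈ dedupSeen ts then dedupSeen ts else dedupSeen ts ++ [t] := by
  simp [dedupSeen, List.foldl_append]

lemma keys_rel (g d : PySem.Dict String (List String)) (h : d.items = g.items.map FmapD) :
    d.keys = g.keys := by
  simp [PySem.Dict.keys, h, List.map_map, FmapD, Function.comp]

lemma step_rel (g d : PySem.Dict String (List String)) (q : String × String)
    (hnd : g.keys.Nodup) (h : d.items = g.items.map FmapD) :
    (stepA d q).items = (stepG g q).items.map FmapD := by
  have hkeys : d.keys = g.keys := keys_rel g d h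
  have hndd : d.keys.Nodup := hkeys ▸ hnd
  have hcont : d.contains q.1 = g.contains q.1 := by
    rw [PySem.Dict.contains_eq_decide_mem_keys, PySem.Dict.contains_eq_decide_mem_keys, hkeys]
  unfold stepA stepG
  simp only [PySem.Dict.modify]
  by_cases hc : g.contains q.1 = true
  · -- key already present in g (hence in d)
    have hcd : d.contains q.1 = true := by rw [hcont, hc]
    have hvg : g.get? q.1 = some (g.getD q.1 []) := by
      have hs := PySem.Dict.contains_eq_isSome_get? g q.1
      rw [hc] at hs
      obtain ⟨v, hv⟩ := Option.isSome_iff_exists.mp hs.symm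
      rw [hv, PySem.Dict.getD_eq_get?_getD, hv]
      rfl
    have hmem : (q.1, g.getD q.1 []) ∈ g.items := PySem.Dict.mem_items_of_get?_eq_some g hvg
    have hmemd : (q.1, dedupSeen (g.getD q.1 [])) ∈ d.items := by
      rw [h]; exact List.mem_map_of_mem hmem
    have hD : d.getD q.1 [] = dedupSeen (g.getD q.1 []) :=
      PySem.Dict.getD_of_mem_items d hmemd hndd []
    simp only [hcd, if_true]
    by_cases hin : q.2 ∈ dedupSeen (g.getD q.1 [])
    · -- duplicate text: A leaves d unchanged; dedup of the grown group is unchanged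
      rw [if_pos (by rw [hD]; exact hin)]
      rw [PySem.Dict.items_insert_of_contains g _ hc, h, List.map_map]
      refine (List.map_congr_left ?_)
      intro p hp
      by_cases hpk : (p.1 == q.1) = true
      · have hpk' : p.1 = q.1 := by simpa using hpk
        have hpv : g.getD p.1 [] = p.2 := by
          have hq := PySem.Dict.get?_of_mem_items g (k := p.1) (v := p.2) (by simpa using hp) hnd
          rw [PySem.Dict.getD_eq_get?_getD, hq]
          rfl
        have hp2 : p.2 = g.getD q.1 [] := by rw [← hpv, hpk']
        simp only [Function.comp_apply, hpk, if_true, FmapD]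
        rw [dedupSeen_snoc, if_pos hin, hpk', hp2]
      · simp only [Function.comp_apply, hpk]
        simp at hpk
        simp
    · -- new text for an existing id: both sides overwrite the value in place
      rw [if_neg (by rw [hD]; exact hin)]
      rw [PySem.Dict.items_insert_of_contains d _ hcd,
          PySem.Dict.items_insert_of_contains g _ hc, h, List.map_map, List.map_map]
      refine (List.map_congr_left ?_)
      intro p hp
      by_cases hpk : (p.1 == q.1) = true
      · simp only [Function.comp_apply, FmapD, hpk, if_true]
        rw [hD, dedupSeen_snoc, if_neg hin]
      · simp only [Function.comp_apply, FmapD, hpk]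
        simp at hpk
        simp
  · -- fresh key: both sides append a new entry at the end
    have hc' : g.contains q.1 = false := by simpa using hc
    have hcd : d.contains q.1 = false := by rw [hcont, hc']
    have hg0 : g.getD q.1 [] = [] := PySem.Dict.getD_of_not_contains g [] hc'
    simp only [hcd, Bool.false_eq_true, if_false]
    rw [PySem.Dict.getD_insert_self d q.1 [] []]
    simp only [List.not_mem_nil, if_false, List.nil_append]
    rw [PySem.Dict.insert_insert_self d q.1 [] [q.2], hg0, List.nil_append]
    rw [PySem.Dict.items_insert_of_not_contains d _ hcd,
        PySem.Dict.items_insert_of_not_contains g _ hc', h]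
    simp [FmapD, dedupSeen]

lemma stepG_nodup (g : PySem.Dict String (List String)) (q : String × String)
    (hnd : g.keys.Nodup) : (stepG g q).keys.Nodup := by
  unfold stepG
  simp only [PySem.Dict.modify]
  exact PySem.Dict.nodup_keys_insert g q.1 _ hnd

lemma fold_rel (L : List (String × String)) (g d : PySem.Dict String (List String))
    (hnd : g.keys.Nodup) (h : d.items = g.items.map FmapD) :
    (L.foldl stepA d).items = (L.foldl stepG g).items.map FmapD := by
  induction L generalizing g d with
  | nil => simpa using h
  | cons q L ih =>
    simp only [List.foldl_cons]
    exact ih (stepG g q) (stepA d q) (stepG_nodup g q hnd) (step_rel g d q hnd h)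

-- both nested zip loops are the flat fold over the flattened pair list
lemma flatA (id_pairs text_pairs : List (List String)) :
    sort_data id_pairs text_pairs
      = ((((id_pairs.zip text_pairs).map fun p => p.1.zip p.2).flatten).foldl stepA
          PySem.Dict.empty).items := by
  unfold sort_data stepA
  rw [List.foldl_flatten, List.foldl_map]

lemma flatG (id_pairs text_pairs : List (List String)) :
    (id_pairs.zip text_pairs).foldl
        (fun g p => (p.1.zip p.2).foldl (fun g q => g.modify q.1 [] (· ++ [q.2])) g)
        (PySem.Dict.empty : PySem.Dict String (List String))
      = (((id_pairs.zip text_pairs).map fun p => p.1.zip p.2).flatten).foldl stepG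
          PySem.Dict.empty := by
  unfold stepG
  rw [List.foldl_flatten, List.foldl_map]

-- ===== VERDICT (by name: the statement is the Claim_ definition above) =====
theorem sort_data_spec : Claim_equal_sort_data := by
  intro id_pairs text_pairs _
  unfold Spec_sort_data sort_data_alt
  rw [flatA, flatG]
  set L := (((id_pairs.zip text_pairs).map fun p => p.1.zip p.2).flatten) with hL
  have hndG : ((L.foldl stepG PySem.Dict.empty).keys).Nodup := by
    unfold stepG
    simp only [PySem.Dict.modify]
    exact PySem.Dict.nodup_keys_foldl_insert_key L (fun q => q.1)
      (fun g q => g.getD q.1 [] ++ [q.2]) PySem.Dict.empty PySem.Dict.nodup_keys_empty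
  rw [PySem.Dict.items_foldl_insert_fresh ((L.foldl stepG PySem.Dict.empty).items)
        (fun kv => kv.1) (fun kv => dedupSeen kv.2) PySem.Dict.empty
        (fun a _ => PySem.Dict.contains_empty _)
        (show (List.map (fun kv : String × List String => kv.1)
            (L.foldl stepG PySem.Dict.empty).items).Nodup from hndG)]
  rw [fold_rel L PySem.Dict.empty PySem.Dict.empty PySem.Dict.nodup_keys_empty rfl]
  rfl
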